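-- pv_equiv track=rewrite | github.com/RumiSepantaAi/knowledge-engine-lab | meta/importer/parser.py | _resolve_column_name
-- ===== SOURCE A (Python) =====
-- COLUMN_ALIASES: dict[str, list[str]] = {
--     "level_1": ["level 1", "l1", "domain", "category", "level1", "lv1"],
--     "level_2": ["level 2", "l2", "subdomain", "subcategory", "level2", "lv2"],
--     "level_3": ["level 3", "l3", "topic", "area", "level3", "lv3"],
--     "level_4": ["level 4", "l4", "term", "item", "terms", "level4", "lv4"],
-- }
--
-- def _normalize_header(header: str) -> str:
--     """Normalize a header for matching.
--
--     Args:
--         header: Raw header string.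
--
--     Returns:
--         Lowercased, trimmed, whitespace-normalized header.
--     """
--     return " ".join(header.lower().strip().split())
--
-- def _resolve_column_name(header: str) -> str | None:
--     """Resolve a header to its canonical column name.
--
--     Args:
--         header: The raw header from the CSV.
--
--     Returns:
--         Canonical column name, or None if not recognized.
--     """
--     normalized = _normalize_header(header)
--
--     for canonical, aliases in COLUMN_ALIASES.items():
--         # Check canonical name itself
--         if normalized == canonical.replace("_", " ") or normalized == canonical:
--             return canonical
--         # Check all aliases
--         if normalized in [a.lower() for a in aliases]:
--             return canonical
--
--     return None
-- ===== SOURCE B (Python) =====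
-- COLUMN_ALIASES: dict[str, list[str]] = {
--     "level_1": ["level 1", "l1", "domain", "category", "level1", "lv1"],
--     "level_2": ["level 2", "l2", "subdomain", "subcategory", "level2", "lv2"],
--     "level_3": ["level 3", "l3", "topic", "area", "level3", "lv3"],
--     "level_4": ["level 4", "l4", "term", "item", "terms", "level4", "lv4"],
-- }
--
-- def _normalize_header(header: str) -> str:
--     return " ".join(header.lower().strip().split())
--
-- ALIAS_TO_CANONICAL: dict[str, str] = {}
-- for _canonical, _aliases in COLUMN_ALIASES.items():
--     ALIAS_TO_CANONICAL[_canonical] = _canonical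
--     ALIAS_TO_CANONICAL[_canonical.replace("_", " ")] = _canonical
--     for _a in _aliases:
--         ALIAS_TO_CANONICAL[_a.lower()] = _canonical
--
-- def _resolve_column_name(header: str) -> str | None:
--     return ALIAS_TO_CANONICAL.get(_normalize_header(header))
-- ===== Notes on version B (the rewrite author's own statement) =====
-- stated objective: simpler
-- what changed: Replaces the per-call loop over COLUMN_ALIASES (with a fresh lowered-alias list built per group per call) by a reverse-lookup dict built once at module load, so resolution is a single dict lookup.
import Mathlib
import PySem

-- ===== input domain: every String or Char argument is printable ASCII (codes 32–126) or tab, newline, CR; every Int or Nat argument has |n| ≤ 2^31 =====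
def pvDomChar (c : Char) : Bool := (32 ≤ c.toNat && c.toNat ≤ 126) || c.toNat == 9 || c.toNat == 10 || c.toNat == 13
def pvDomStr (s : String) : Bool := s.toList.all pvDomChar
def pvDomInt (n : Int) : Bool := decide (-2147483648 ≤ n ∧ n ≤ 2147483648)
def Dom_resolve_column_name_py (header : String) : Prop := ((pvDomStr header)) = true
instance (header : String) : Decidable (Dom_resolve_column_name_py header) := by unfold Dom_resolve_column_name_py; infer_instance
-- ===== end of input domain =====

-- B builds the reverse-lookup dict once so resolution is a single dict lookup instead of a scan of COLUMN_ALIASES (objective: simpler).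

-- ===== PORT A =====
def pvCOLUMN_ALIASES : List (String × List String) :=
  [("level_1", ["level 1", "l1", "domain", "category", "level1", "lv1"]),
   ("level_2", ["level 2", "l2", "subdomain", "subcategory", "level2", "lv2"]),
   ("level_3", ["level 3", "l3", "topic", "area", "level3", "lv3"]),
   ("level_4", ["level 4", "l4", "term", "item", "terms", "level4", "lv4"])]

def pvNormalizeHeader (header : String) : String :=
  PySem.Str.join " " (PySem.Str.split₀ (PySem.Str.strip (PySem.Str.lower header)))

-- the for-loop of A, returning at the first matching group
def pvResolveLoop (normalized : String) : List (String × List String) → Option String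
  | [] => none
  | (canonical, aliases) :: rest =>
    if normalized == PySem.Str.replace canonical "_" " " || normalized == canonical then
      some canonical
    else if (aliases.map PySem.Str.lower).contains normalized then
      some canonical
    else pvResolveLoop normalized rest

def resolve_column_name_py (header : String) : Option String :=
  pvResolveLoop (pvNormalizeHeader header) pvCOLUMN_ALIASES

-- ===== PORT B =====
-- reverse-lookup dict, built once (module level in Source B)
def pvAliasToCanonical : PySem.Dict String String :=
  pvCOLUMN_ALIASES.foldl
    (fun d p =>
      let d := d.insert p.1 p.1
      let d := d.insert (PySem.Str.replace p.1 "_" " ") p.1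
      p.2.foldl (fun d a => d.insert (PySem.Str.lower a) p.1) d)
    PySem.Dict.empty

def resolve_column_name_py_alt (header : String) : Option String :=
  pvAliasToCanonical.get? (pvNormalizeHeader header)

-- ===== PRECONDITION & SPEC =====
def Spec_resolve_column_name_py (header : String) (out : Option String) : Prop := out = resolve_column_name_py_alt header
instance (header : String) (out : Option String) : Decidable (Spec_resolve_column_name_py header out) := by unfold Spec_resolve_column_name_py; infer_instance

-- ===== CLAIM (what is proved, stated in full; the proofs are below) =====
def Claim_equal_resolve_column_name_py : Prop := ∀ (header : String), Dom_resolve_column_name_py header → Spec_resolve_column_name_py header (resolve_column_name_py header)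

-- ===== LEMMAS AND PROOFS =====
-- core fact: on ANY normalized string, A's scan and B's dict lookup agree
set_option maxRecDepth 8192 in
theorem pvDictEval : pvAliasToCanonical = PySem.Dict.mk
  [("level_1","level_1"),("level 1","level_1"),("l1","level_1"),("domain","level_1"),("category","level_1"),("level1","level_1"),("lv1","level_1"),
   ("level_2","level_2"),("level 2","level_2"),("l2","level_2"),("subdomain","level_2"),("subcategory","level_2"),("level2","level_2"),("lv2","level_2"),
   ("level_3","level_3"),("level 3","level_3"),("l3","level_3"),("topic","level_3"),("area","level_3"),("level3","level_3"),("lv3","level_3"),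
   ("level_4","level_4"),("level 4","level_4"),("l4","level_4"),("term","level_4"),("item","level_4"),("terms","level_4"),("level4","level_4"),("lv4","level_4")] := by decide

set_option maxRecDepth 8192 in
theorem pv_core (n : String) : pvResolveLoop n pvCOLUMN_ALIASES = pvAliasToCanonical.get? n := by
  by_cases h : n ∈ (["level 1", "level_1", "l1", "domain", "category", "level1", "lv1",
    "level 2", "level_2", "l2", "subdomain", "subcategory", "level2", "lv2",
    "level 3", "level_3", "l3", "topic", "area", "level3", "lv3",
    "level 4", "level_4", "l4", "term", "item", "terms", "level4", "lv4"] : List String)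
  · fin_cases h <;> decide
  · simp only [List.mem_cons, List.not_mem_nil, or_false, not_or] at h
    obtain ⟨h1,h2,h3,h4,h5,h6,h7,h8,h9,h10,h11,h12,h13,h14,h15,h16,h17,h18,h19,h20,h21,h22,h23,h24,h25,h26,h27,h28,h29⟩ := h
    rw [pvDictEval]
    simp only [pvCOLUMN_ALIASES, pvResolveLoop,
      show PySem.Str.replace "level_1" "_" " " = "level 1" from by decide,
      show PySem.Str.replace "level_2" "_" " " = "level 2" from by decide,
      show PySem.Str.replace "level_3" "_" " " = "level 3" from by decide,
      show PySem.Str.replace "level_4" "_" " " = "level 4" from by decide,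
      show ["level 1", "l1", "domain", "category", "level1", "lv1"].map PySem.Str.lower = ["level 1", "l1", "domain", "category", "level1", "lv1"] from by decide,
      show ["level 2", "l2", "subdomain", "subcategory", "level2", "lv2"].map PySem.Str.lower = ["level 2", "l2", "subdomain", "subcategory", "level2", "lv2"] from by decide,
      show ["level 3", "l3", "topic", "area", "level3", "lv3"].map PySem.Str.lower = ["level 3", "l3", "topic", "area", "level3", "lv3"] from by decide,
      show ["level 4", "l4", "term", "item", "terms", "level4", "lv4"].map PySem.Str.lower = ["level 4", "l4", "term", "item", "terms", "level4", "lv4"] from by decide,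
      PySem.Dict.get?_mk_cons, List.contains_eq_mem, List.mem_cons, List.not_mem_nil,
      beq_iff_eq, decide_eq_true_eq]
    simp [PySem.Dict.get?, h1,h2,h3,h4,h5,h6,h7,h8,h9,h10,h11,h12,h13,h14,h15,h16,h17,h18,h19,h20,h21,h22,h23,h24,h25,h26,h27,h28,h29,
      Ne.symm h1, Ne.symm h2, Ne.symm h3, Ne.symm h4, Ne.symm h5, Ne.symm h6, Ne.symm h7, Ne.symm h8, Ne.symm h9, Ne.symm h10,
      Ne.symm h11, Ne.symm h12, Ne.symm h13, Ne.symm h14, Ne.symm h15, Ne.symm h16, Ne.symm h17, Ne.symm h18, Ne.symm h19, Ne.symm h20,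
      Ne.symm h21, Ne.symm h22, Ne.symm h23, Ne.symm h24, Ne.symm h25, Ne.symm h26, Ne.symm h27, Ne.symm h28, Ne.symm h29]

-- ===== VERDICT (by name: the statement is the Claim_ definition above) =====
theorem resolve_column_name_py_spec : Claim_equal_resolve_column_name_py := by
  intro header _
  unfold Spec_resolve_column_name_py resolve_column_name_py resolve_column_name_py_alt
  exact pv_core _
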